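-- pv_equiv track=rewrite | github.com/damonallison/python-examples | edu/harvard/cs50p/week2.py | validate_vanity_plate
-- ===== SOURCE A (Python) =====
-- def validate_vanity_plate(plate: str) -> bool:
--     """
--     validate `vanity license plates` (the input string) matches the following rules:
--
--     * starts with 2 letters
--     * min of 2 chars, max of 6
--     * numbers must come at the end
--     * the first number used cannot be a zero
--     * no periods, spaces, or punctuation marks are allowed
--     """
--
--     # length first
--     if len(plate) < 2 or len(plate) > 6:
--         return False
--
--     if not plate[0].isalpha() or not plate[1].isalpha():
--         return False
--
--     found_number = False
--     for c in plate:
--         if not (c.isalpha() or c.isnumeric()):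
--             return False
--         if c.isnumeric():
--             if not found_number and c == "0":
--                 # first number cannot be zero
--                 return False
--             found_number = True
--         elif found_number:
--             # alpha occurs after number
--             return False
--
--     return True
-- ===== SOURCE B (Python) =====
-- def validate_vanity_plate(plate: str) -> bool:
--     """Validate a vanity plate by splitting it into its alpha prefix and the rest."""
--     if len(plate) < 2 or len(plate) > 6:
--         return False
--     if not plate[0].isalpha() or not plate[1].isalpha():
--         return False
--     i = 0
--     while i < len(plate) and plate[i].isalpha():
--         i += 1
--     rest = plate[i:]
--     if rest == "":
--         return True
--     if rest[0] == "0":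
--         return False
--     for c in rest:
--         if not c.isnumeric():
--             return False
--     return True
-- ===== Notes on version B (the rewrite author's own statement) =====
-- stated objective: alternative
-- what changed: Replaces A's single stateful found_number pass with an explicit partition: skip the leading alphabetic run, then check the remaining suffix is a non-zero-leading all-numeric block.
import Mathlib
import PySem

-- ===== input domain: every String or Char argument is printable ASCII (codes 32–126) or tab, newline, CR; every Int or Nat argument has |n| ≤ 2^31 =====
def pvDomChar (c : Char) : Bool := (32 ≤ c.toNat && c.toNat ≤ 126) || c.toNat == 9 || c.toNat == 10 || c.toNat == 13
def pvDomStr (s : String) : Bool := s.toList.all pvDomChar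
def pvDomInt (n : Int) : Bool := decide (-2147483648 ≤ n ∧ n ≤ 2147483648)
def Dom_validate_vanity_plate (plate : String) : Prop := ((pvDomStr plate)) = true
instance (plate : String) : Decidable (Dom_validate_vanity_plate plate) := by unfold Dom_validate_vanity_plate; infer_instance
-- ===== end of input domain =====

-- B partitions the plate into its alpha prefix and the rest instead of A's single stateful pass (objective: alternative decomposition).
-- On the ASCII domain Python's c.isnumeric() coincides with PySem.Chars.isdigit, which is used for it in both ports.

-- ===== PORT A =====
-- A's for-loop over the characters carrying the found_number flag
def vvpLoopA : List Char → Bool → Bool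
  | [], _ => true
  | c :: cs, found =>
    if !(PySem.Chars.isalpha c || PySem.Chars.isdigit c) then false
    else if PySem.Chars.isdigit c then
      if !found && c == '0' then false else vvpLoopA cs true
    else if found then false
    else vvpLoopA cs found

def validate_vanity_plate (plate : String) : Bool :=
  let l := plate.toList
  if l.length < 2 || l.length > 6 then false
  else
    -- plate[0] / plate[1]: in range, the length guard ensures len ≥ 2
    match PySem.List.pyGet? l 0, PySem.List.pyGet? l 1 with
    | some c0, some c1 =>
      if !PySem.Chars.isalpha c0 || !PySem.Chars.isalpha c1 then false
      else vvpLoopA l false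
    | _, _ => false

-- ===== PORT B =====
-- B's while loop advancing past the leading alphabetic run (returns the remaining suffix)
def vvpSkipAlpha : List Char → List Char
  | [] => []
  | c :: cs => if PySem.Chars.isalpha c then vvpSkipAlpha cs else c :: cs

-- B's for-loop over rest checking every character is numeric
def vvpAllNum : List Char → Bool
  | [] => true
  | c :: cs => if !PySem.Chars.isdigit c then false else vvpAllNum cs

def validate_vanity_plate_alt (plate : String) : Bool :=
  let l := plate.toList
  if l.length < 2 || l.length > 6 then false
  else match l with
    | c0 :: c1 :: _ =>
      if !PySem.Chars.isalpha c0 || !PySem.Chars.isalpha c1 then false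
      else
        match vvpSkipAlpha l with
        | [] => true
        | r0 :: rs => if r0 == '0' then false else vvpAllNum (r0 :: rs)
    | _ => false

-- ===== PRECONDITION & SPEC =====
def Spec_validate_vanity_plate (plate : String) (out : Bool) : Prop := out = validate_vanity_plate_alt plate
instance (plate : String) (out : Bool) : Decidable (Spec_validate_vanity_plate plate out) := by unfold Spec_validate_vanity_plate; infer_instance

-- ===== CLAIM (what is proved, stated in full; the proofs are below) =====
def Claim_equal_validate_vanity_plate : Prop := ∀ (plate : String), Dom_validate_vanity_plate plate → Spec_validate_vanity_plate plate (validate_vanity_plate plate)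

-- ===== LEMMAS AND PROOFS =====

theorem vvp_alpha_not_digit (c : Char) (h : PySem.Chars.isalpha c = true) :
    PySem.Chars.isdigit c = false := by
  simp [PySem.Chars.isalpha, PySem.Chars.isupper, PySem.Chars.islower, Char.le_def] at h
  simp [PySem.Chars.isdigit, Char.le_def, UInt32.le_iff_toNat_le] at *
  omega

theorem vvp_loop_found (l : List Char) : vvpLoopA l true = vvpAllNum l := by
  induction l with
  | nil => rfl
  | cons c cs ih =>
    by_cases hd : PySem.Chars.isdigit c = true
    · simp [vvpLoopA, vvpAllNum, hd, ih]
    · simp at hd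
      cases ha : PySem.Chars.isalpha c <;> simp [vvpLoopA, vvpAllNum, hd, ha]

theorem vvp_loop_eq_partition (l : List Char) :
    vvpLoopA l false =
      (match vvpSkipAlpha l with
       | [] => true
       | r0 :: rs => if r0 == '0' then false else vvpAllNum (r0 :: rs)) := by
  induction l with
  | nil => rfl
  | cons c cs ih =>
    by_cases ha : PySem.Chars.isalpha c = true
    · have hd := vvp_alpha_not_digit c ha
      simpa [vvpLoopA, vvpSkipAlpha, ha, hd] using ih
    · simp at ha
      by_cases hd : PySem.Chars.isdigit c = true
      · by_cases hz : c = '0'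
        · subst hz
          simp [vvpLoopA, vvpSkipAlpha,
            show PySem.Chars.isdigit '0' = true from by decide,
            show PySem.Chars.isalpha '0' = false from by decide]
        · simp [vvpLoopA, vvpSkipAlpha, vvpAllNum, ha, hd, hz, vvp_loop_found]
      · simp at hd
        simp [vvpLoopA, vvpSkipAlpha, vvpAllNum, ha, hd]

-- ===== VERDICT (by name: the statement is the Claim_ definition above) =====
theorem validate_vanity_plate_spec : Claim_equal_validate_vanity_plate := by
  intro plate _
  unfold Spec_validate_vanity_plate validate_vanity_plate validate_vanity_plate_alt
  cases l : plate.toList with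
  | nil => simp
  | cons c0 t =>
    cases t with
    | nil => simp
    | cons c1 rest =>
      simp [PySem.List.pyGet?, PySem.List.pyIdx?, vvp_loop_eq_partition,
        show (0:Int) ≤ (rest.length:Int) + 1 from by positivity]
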